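-- pv_equiv track=rewrite | github.com/manemusayelyan/armenian_ai_voice_agent | scraping/scrapers/fastbank_scraper.py | _build_fallback_rates_table
-- ===== SOURCE A (Python) =====
-- def _build_fallback_rates_table(detail_parts: list[str]) -> str:
--     if len(detail_parts) < 2:
--         return ""
--
--     rows = []
--     index = 0
--     while index < len(detail_parts):
--         left = detail_parts[index]
--         right = detail_parts[index + 1] if index + 1 < len(detail_parts) else ""
--         if right:
--             rows.append(f"{left} | {right}")
--         else:
--             rows.append(left)
--         index += 2
--
--     return "\n".join(rows)
-- ===== SOURCE B (Python) =====
-- def _build_fallback_rates_table(detail_parts: list[str]) -> str: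
--     if len(detail_parts) < 2:
--         return ""
--     out = detail_parts[0]
--     for i, part in enumerate(detail_parts[1:], start=1):
--         if i % 2 == 1:
--             if part:
--                 out += " | " + part
--         else:
--             out += "\n" + part
--     return out
-- ===== Notes on version B (the rewrite author's own statement) =====
-- stated objective: alternative
-- what changed: Replaces the stride-2 index loop that pairs adjacent elements into a rows list and joins it with a single forward pass over every element in which the index parity decides which separator (' | ' or a newline) to append to one string accumulator; there is no pairing, no rows list and no join.
import Mathlib
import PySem

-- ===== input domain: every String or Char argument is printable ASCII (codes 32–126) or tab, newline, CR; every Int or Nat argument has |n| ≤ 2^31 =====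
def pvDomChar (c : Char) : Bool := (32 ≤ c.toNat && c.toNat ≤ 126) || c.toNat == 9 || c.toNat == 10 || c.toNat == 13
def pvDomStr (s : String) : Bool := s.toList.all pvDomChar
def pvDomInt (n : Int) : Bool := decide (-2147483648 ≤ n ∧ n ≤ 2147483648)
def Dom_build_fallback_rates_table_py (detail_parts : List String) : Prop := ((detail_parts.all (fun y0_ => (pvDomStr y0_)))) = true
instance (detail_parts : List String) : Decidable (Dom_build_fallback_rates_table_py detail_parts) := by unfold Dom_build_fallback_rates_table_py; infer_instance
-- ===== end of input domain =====

-- B replaces A's stride-2 pairing loop (rows list + final join) with a single pass over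
-- every element whose index parity picks the separator appended to one string
-- accumulator: no pairing, no rows list, no join (objective: alternative).


-- ===== PORT A =====
-- A's while loop: index steps by 2; detail_parts[index] is in range by the loop guard,
-- detail_parts[index + 1] is read only under the explicit 'index + 1 < len' check (so getD's
-- default is never the value actually used out of that guard; "" is exactly A's else value).
def pvAWhile (detail_parts : List String) (index : Nat) : List String :=
  if h : index < detail_parts.length then
    let left := detail_parts[index]
    let right := if index + 1 < detail_parts.length then detail_parts.getD (index + 1) "" else ""
    (if right ≠ "" then left ++ " | " ++ right else left) :: pvAWhile detail_parts (index + 2)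
  else []
termination_by detail_parts.length - index

def build_fallback_rates_table_py (detail_parts : List String) : String :=
  if detail_parts.length < 2 then ""
  else PySem.Str.join "\n" (pvAWhile detail_parts 0)

-- ===== PORT B =====
-- Source B's loop body: index parity decides the separator appended to the accumulator
-- (odd index = right column, appended only if non-empty; even index = new row).
def pvStep (out : String) (xi : String × Nat) : String :=
  if xi.2 % 2 == 1 then (if xi.1 ≠ "" then out ++ " | " ++ xi.1 else out)
  else out ++ "\n" ++ xi.1

-- enumerate(detail_parts[1:], start=1) = (tail).zipIdx 1; the [] arm is unreachable
-- under the length ≥ 2 guard ("" keeps the match total).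
def build_fallback_rates_table_py_alt (detail_parts : List String) : String :=
  if detail_parts.length < 2 then ""
  else
    match detail_parts with
    | [] => ""
    | p0 :: rest => (rest.zipIdx 1).foldl pvStep p0

-- ===== PRECONDITION & SPEC =====
def Spec_build_fallback_rates_table_py (detail_parts : List String) (out : String) : Prop := out = build_fallback_rates_table_py_alt detail_parts
instance (detail_parts : List String) (out : String) : Decidable (Spec_build_fallback_rates_table_py detail_parts out) := by unfold Spec_build_fallback_rates_table_py; infer_instance

-- ===== CLAIM (what is proved, stated in full; the proofs are below) =====
def Claim_equal_build_fallback_rates_table_py : Prop := ∀ (detail_parts : List String), Dom_build_fallback_rates_table_py detail_parts → Spec_build_fallback_rates_table_py detail_parts (build_fallback_rates_table_py detail_parts)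

-- ===== LEMMAS AND PROOFS =====
-- A's loop at index i + 2 over a list with two extra front elements is the loop at i without them.
theorem pvAWhile_shift (l : List String) (a b : String) (i : Nat) :
    pvAWhile (a :: b :: l) (i + 2) = pvAWhile l i := by
  induction hn : l.length - i using Nat.strong_induction_on generalizing i with
  | _ n ih =>
    conv_lhs => rw [pvAWhile]
    conv_rhs => rw [pvAWhile]
    by_cases h : i < l.length
    · have h2 : i + 2 < (a :: b :: l).length := by simp; omega
      rw [dif_pos h2, dif_pos h]
      have hget : (a :: b :: l)[i + 2]'h2 = l[i]'h := by simp
      have hgd : (a :: b :: l).getD (i + 2 + 1) "" = l.getD (i + 1) "" := by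
        simp [List.getD]
      have hiff : (i + 2 + 1 < (a :: b :: l).length) ↔ (i + 1 < l.length) := by
        simp only [List.length_cons]; omega
      have hrec : pvAWhile (a :: b :: l) (i + 2 + 2) = pvAWhile l (i + 2) :=
        ih (l.length - (i + 2)) (by omega) (i + 2) rfl
      simp only [hget, hgd, hrec]
      congr 1
      by_cases h3 : i + 1 < l.length
      · rw [if_pos (hiff.mpr h3), if_pos h3]
      · rw [if_neg (fun hc => h3 (hiff.mp hc)), if_neg h3]
    · have h2 : ¬ (i + 2 < (a :: b :: l).length) := by simp; omega
      rw [dif_neg h2, dif_neg h]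

theorem pv_join_singleton (x : String) : PySem.Str.join "\n" [x] = x := by
  unfold PySem.Str.join
  rw [List.map_cons, List.map_nil, PySem.Chars.join_singleton, String.ofList_toList]

theorem pv_join_cons2 (x y : String) (ys : List String) :
    PySem.Str.join "\n" (x :: y :: ys) = x ++ "\n" ++ PySem.Str.join "\n" (y :: ys) := by
  unfold PySem.Str.join
  rw [List.map_cons, List.map_cons, show ("\n" : String).toList = ['\n'] from rfl,
    PySem.Chars.join_cons_cons]
  rw [String.ofList_append, String.ofList_append, String.ofList_toList]

-- pvStep reads only the parity of the index, so the fold may start two indices later.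
theorem pvFold_parity (l : List String) (m : Nat) (X : String) :
    (l.zipIdx (m + 2)).foldl pvStep X = (l.zipIdx m).foldl pvStep X := by
  induction l generalizing m X with
  | nil => rfl
  | cons a l ih =>
    rw [List.zipIdx_cons, List.zipIdx_cons, List.foldl_cons, List.foldl_cons]
    have hstep : pvStep X (a, m + 2) = pvStep X (a, m) := by
      simp [pvStep, Nat.add_mod_right]
    rw [hstep, show m + 2 + 1 = m + 1 + 2 by omega, ih]

-- pvStep only appends on the right, so a fixed prefix factors out of the fold.
theorem pvFold_append (l : List String) (m : Nat) (X Y : String) :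
    (l.zipIdx m).foldl pvStep (X ++ Y) = X ++ (l.zipIdx m).foldl pvStep Y := by
  induction l generalizing m Y with
  | nil => rfl
  | cons a l ih =>
    rw [List.zipIdx_cons, List.foldl_cons, List.foldl_cons]
    have hstep : pvStep (X ++ Y) (a, m) = X ++ pvStep Y (a, m) := by
      unfold pvStep
      split_ifs <;> simp [String.append_assoc]
    rw [hstep, ih]

-- A's first loop step, at the head of the list.
theorem pvAWhile_cons2 (a b : String) (rest : List String) :
    pvAWhile (a :: b :: rest) 0 =
      (if b ≠ "" then a ++ " | " ++ b else a) :: pvAWhile rest 0 := by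
  conv_lhs => rw [pvAWhile]
  rw [dif_pos (show 0 < (a :: b :: rest).length by simp)]
  rw [pvAWhile_shift]
  simp [List.getD]

-- joined rows of A's loop = B's parity-driven fold, for any non-empty list.
theorem join_pvAWhile_eq_fold (rest : List String) (p : String) :
    PySem.Str.join "\n" (pvAWhile (p :: rest) 0) = (rest.zipIdx 1).foldl pvStep p := by
  induction hn : rest.length using Nat.strong_induction_on generalizing p rest with
  | _ n ih =>
    match rest with
    | [] =>
      have h1 : pvAWhile [p] 0 = [p] := by
        rw [pvAWhile]; rw [pvAWhile]; simp
      rw [h1, pv_join_singleton]; rfl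
    | b :: rest' =>
      rw [pvAWhile_cons2, List.zipIdx_cons, List.foldl_cons]
      have hstep1 : pvStep p (b, 1) = (if b ≠ "" then p ++ " | " ++ b else p) := by
        simp [pvStep]
      rw [hstep1]
      match rest' with
      | [] =>
        have h0 : pvAWhile ([] : List String) 0 = [] := by rw [pvAWhile]; simp
        rw [h0, pv_join_singleton]; rfl
      | c :: rest'' =>
        rw [List.zipIdx_cons, List.foldl_cons]
        have hstep2 : pvStep (if b ≠ "" then p ++ " | " ++ b else p) (c, 2) =
            (if b ≠ "" then p ++ " | " ++ b else p) ++ "\n" ++ c := by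
          simp [pvStep]
        rw [hstep2, show (2 : Nat) + 1 = 1 + 2 from rfl, pvFold_parity,
          show (if b ≠ "" then p ++ " | " ++ b else p) ++ "\n" ++ c =
            ((if b ≠ "" then p ++ " | " ++ b else p) ++ "\n") ++ c from rfl,
          pvFold_append,
          ← ih rest''.length (by simp at hn; omega) rest'' c rfl]
        have hshape : ∃ y ys, pvAWhile (c :: rest'') 0 = y :: ys := by
          rw [pvAWhile]
          exact ⟨_, _, dif_pos (by simp)⟩
        obtain ⟨y, ys, hx⟩ := hshape
        rw [hx, pv_join_cons2, ← hx]

-- ===== VERDICT (by name: the statement is the Claim_ definition above) =====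
theorem build_fallback_rates_table_py_spec : Claim_equal_build_fallback_rates_table_py := by
  intro detail_parts _
  unfold Spec_build_fallback_rates_table_py build_fallback_rates_table_py build_fallback_rates_table_py_alt
  match detail_parts with
  | [] => rfl
  | [x] => rfl
  | a :: b :: rest =>
    rw [if_neg (by simp), if_neg (by simp)]
    exact join_pvAWhile_eq_fold (b :: rest) a
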